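-- pv_equiv track=rewrite | github.com/markoandjel/Artificial_Intelligence | Projekat/domineering.py | odredi_heuristiku
-- ===== SOURCE A (Python) =====
-- def odredi_heuristiku(stanje):
--     popunjene_kolone=0
--     popunjene_vrste=0
--     polu_popunjene_vrste=0
--     polu_popunjene_kolone=0
--
--     for vrsta in stanje:
--         if all(map(lambda x: True if (x==0 or x==1) else False,vrsta)):
--             popunjene_vrste+=1
--         if vrsta.count(None)==1:
--             polu_popunjene_vrste+=1
--
--     for kolona in range(len(stanje[0])):
--         if all(map(lambda x: True if (x==0 or x==1) else False,[stanje[vrsta][kolona] for vrsta in range(len(stanje))])):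
--             popunjene_kolone+=1
--         if [stanje[vrsta][kolona] for vrsta in range(len(stanje))].count(None)==1:
--             polu_popunjene_kolone+=1
--
--     return polu_popunjene_kolone+polu_popunjene_vrste+popunjene_kolone+popunjene_vrste
-- ===== SOURCE B (Python) =====
-- def odredi_heuristiku(stanje):
--     width = len(stanje[0])
--     height = len(stanje)
--     col_filled = [0] * width
--     col_none = [0] * width
--     total = 0
--     for row in stanje:
--         filled = 0
--         none_cnt = 0
--         for x in row:
--             if x == 0 or x == 1:
--                 filled += 1
--             elif x is None:
--                 none_cnt += 1
--         if filled == len(row):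
--             total += 1
--         if none_cnt == 1:
--             total += 1
--         col_filled = [c + (1 if (x == 0 or x == 1) else 0) for c, x in zip(col_filled, row)]
--         col_none = [c + (1 if x is None else 0) for c, x in zip(col_none, row)]
--     for cf, cn in zip(col_filled, col_none):
--         if cf == height:
--             total += 1
--         if cn == 1:
--             total += 1
--     return total
-- ===== Notes on version B (the rewrite author's own statement) =====
-- stated objective: alternative
-- what changed: A re-extracts each column as a fresh list (twice per column) in a second nested loop; B makes one fused pass over the rows maintaining per-column filled/None counter arrays (updated by zipping counters with the row) plus inline row totals, then reads the four counts off the counter arrays.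
import Mathlib
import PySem

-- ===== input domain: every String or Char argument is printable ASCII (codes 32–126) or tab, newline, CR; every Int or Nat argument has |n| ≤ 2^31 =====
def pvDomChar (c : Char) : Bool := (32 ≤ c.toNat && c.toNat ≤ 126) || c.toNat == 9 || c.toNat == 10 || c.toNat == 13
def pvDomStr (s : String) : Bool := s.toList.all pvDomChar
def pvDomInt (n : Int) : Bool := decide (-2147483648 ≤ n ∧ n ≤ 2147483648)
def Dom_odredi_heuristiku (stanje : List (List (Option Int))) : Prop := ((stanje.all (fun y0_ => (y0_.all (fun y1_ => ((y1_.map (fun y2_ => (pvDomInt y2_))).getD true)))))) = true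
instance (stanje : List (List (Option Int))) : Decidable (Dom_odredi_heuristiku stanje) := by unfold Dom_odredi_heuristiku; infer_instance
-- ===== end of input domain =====

-- B replaces A's column-re-extraction second loop by one fused pass over the rows
-- maintaining per-column filled/None counter arrays (alternative decomposition, same cost).

-- ===== PORT A =====
def odredi_heuristiku (stanje : List (List (Option Int))) : Int :=
  -- first loop: over the rows, counting popunjene_vrste / polu_popunjene_vrste
  let rowP : Int × Int := stanje.foldl (fun (p : Int × Int) vrsta =>
      (p.1 + (if (vrsta.map (fun x => if x = some 0 ∨ x = some 1 then true else false)).all (fun b => b) then 1 else 0),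
       p.2 + (if vrsta.count none = 1 then 1 else 0))) (0, 0)
  -- len(stanje[0]); `.getD []` is only reached where Python raises IndexError (outside Pre_)
  let width := ((PySem.List.pyGet? stanje 0).getD []).length
  -- second loop: over the column indices, re-extracting each column as a list;
  -- `.getD none` on the cell is only reached where Python raises IndexError (outside Pre_)
  let colP : Int × Int := (List.range width).foldl (fun (p : Int × Int) (kolona : Nat) =>
      (p.1 + (if (((List.range stanje.length).map (fun (vrsta : Nat) =>
               (PySem.List.pyGet? ((PySem.List.pyGet? stanje (vrsta : Int)).getD []) (kolona : Int)).getD none)).map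
               (fun x => if x = some 0 ∨ x = some 1 then true else false)).all (fun b => b) then 1 else 0),
       p.2 + (if ((List.range stanje.length).map (fun (vrsta : Nat) =>
               (PySem.List.pyGet? ((PySem.List.pyGet? stanje (vrsta : Int)).getD []) (kolona : Int)).getD none)).count none = 1 then 1 else 0))) (0, 0)
  colP.2 + rowP.2 + colP.1 + rowP.1

-- ===== PORT B =====
def odredi_heuristiku_alt (stanje : List (List (Option Int))) : Int :=
  -- width = len(stanje[0]) (`.getD []` only reached where Python raises, outside Pre_); height = len(stanje)
  let width := ((PySem.List.pyGet? stanje 0).getD []).length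
  let height := stanje.length
  -- single pass over the rows: (total, col_filled, col_none)
  let s : Int × List Int × List Int := stanje.foldl (fun (s : Int × List Int × List Int) row =>
      let fn : Int × Int := row.foldl (fun (q : Int × Int) x =>
          if x = some 0 ∨ x = some 1 then (q.1 + 1, q.2)
          else if x = none then (q.1, q.2 + 1) else q) (0, 0)
      (s.1 + (if fn.1 = (row.length : Int) then 1 else 0)
           + (if fn.2 = 1 then 1 else 0),
       List.zipWith (fun c x => c + (if x = some 0 ∨ x = some 1 then (1 : Int) else 0)) s.2.1 row,
       List.zipWith (fun c x => c + (if x = none then (1 : Int) else 0)) s.2.2 row))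
    (0, List.replicate width 0, List.replicate width 0)
  -- final short loop over the column counters
  (List.zip s.2.1 s.2.2).foldl (fun t p =>
      t + (if p.1 = (height : Int) then 1 else 0)
        + (if p.2 = 1 then 1 else 0)) s.1

-- ===== PRECONDITION & SPEC =====
-- Pre_ excludes exactly the inputs where Python A raises IndexError: the empty board
-- (stanje[0]) and ragged boards with some row shorter than row 0 (column access).
def Pre_odredi_heuristiku (stanje : List (List (Option Int))) : Prop :=
  stanje ≠ [] ∧ ∀ r ∈ stanje, stanje.headI.length ≤ r.length
instance (stanje : List (List (Option Int))) : Decidable (Pre_odredi_heuristiku stanje) := by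
  unfold Pre_odredi_heuristiku; infer_instance

def pvWitness_odredi_heuristiku : List (List (Option Int)) :=
  [[some 0, none, some 2], [some 1, some 1, none]]

def Spec_odredi_heuristiku (stanje : List (List (Option Int))) (out : Int) : Prop := out = odredi_heuristiku_alt stanje
instance (stanje : List (List (Option Int))) (out : Int) : Decidable (Spec_odredi_heuristiku stanje out) := by unfold Spec_odredi_heuristiku; infer_instance

-- ===== CLAIM (what is proved, stated in full; the proofs are below) =====
def Claim_equal_odredi_heuristiku : Prop := ∀ (stanje : List (List (Option Int))), Dom_odredi_heuristiku stanje → Pre_odredi_heuristiku stanje → Spec_odredi_heuristiku stanje (odredi_heuristiku stanje)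

-- ===== LEMMAS AND PROOFS =====

-- the canonical value both ports are shown to compute
def pvFull (r : List (Option Int)) : Int :=
  if r.countP (fun x => decide (x = some 0 ∨ x = some 1)) = r.length then 1 else 0
def pvHalf (r : List (Option Int)) : Int :=
  if r.count none = 1 then 1 else 0
def pvCol (stanje : List (List (Option Int))) (j : Nat) : List (Option Int) :=
  stanje.map (fun r => (r[j]?).getD none)
def pvCanon (stanje : List (List (Option Int))) : Int :=
  (stanje.map (fun r => pvFull r + pvHalf r)).sum
  + ((List.range stanje.headI.length).map (fun j => pvFull (pvCol stanje j) + pvHalf (pvCol stanje j))).sum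

lemma pv_pairFold {α : Type} (f g : α → Int) (l : List α) (a b : Int) :
    l.foldl (fun p x => (p.1 + f x, p.2 + g x)) (a, b)
      = (a + (l.map f).sum, b + (l.map g).sum) := by
  induction l generalizing a b with
  | nil => simp
  | cons x xs ih => simp [ih]; constructor <;> ring

lemma pv_sumFold {α : Type} (f g : α → Int) (l : List α) (a : Int) :
    l.foldl (fun t x => t + f x + g x) a = a + (l.map (fun x => f x + g x)).sum := by
  induction l generalizing a with
  | nil => simp
  | cons x xs ih => simp [ih]; ring

lemma pv_mapRange {α β : Type} (l : List α) (f : α → β) (d : α) :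
    (List.range l.length).map (fun i => f ((l[i]?).getD d)) = l.map f := by
  apply List.ext_getElem
  · simp
  · intro i h1 h2
    have hi : i < l.length := by simpa using h2
    simp [List.getElem?_eq_getElem hi]

lemma pv_colmap (stanje : List (List (Option Int))) (k : Nat) :
    (List.range stanje.length).map (fun i => (((stanje[i]?).getD [])[k]?).getD none)
      = stanje.map (fun r => (r[k]?).getD none) :=
  pv_mapRange stanje (fun r => (r[k]?).getD none) []

lemma pv_get0 {α : Type} [Inhabited α] (l : List α) (d : α) (h : l ≠ []) :
    (PySem.List.pyGet? l 0).getD d = l.headI := by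
  cases l with
  | nil => exact absurd rfl h
  | cons x xs => rw [PySem.List.pyGet?_zero]; simp

lemma pv_count01 (r : List (Option Int)) :
    (r.map (fun x => if x = some 0 ∨ x = some 1 then (1:Int) else 0)).sum
      = (r.countP (fun x => decide (x = some 0 ∨ x = some 1)) : Int) :=
  PySem.List.sum_map_ite_one_zero' _ _

lemma pv_countNone (r : List (Option Int)) :
    (r.map (fun x => if x = none then (1:Int) else 0)).sum = (r.count none : Int) := by
  rw [PySem.List.sum_map_ite_one_zero', List.count_eq_countP]
  congr 1
  apply List.countP_congr
  intro x _
  cases x <;> simp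

lemma pv_indA (r : List (Option Int)) :
    (if (r.map (fun x => if x = some 0 ∨ x = some 1 then true else false)).all (fun b => b) then (1:Int) else 0)
      = pvFull r := by
  have h : ((r.map (fun x => if x = some 0 ∨ x = some 1 then true else false)).all (fun b => b) = true)
      ↔ (r.countP (fun x => decide (x = some 0 ∨ x = some 1)) = r.length) := by
    rw [List.countP_eq_length]
    simp
  unfold pvFull
  by_cases hc : r.countP (fun x => decide (x = some 0 ∨ x = some 1)) = r.length
  · rw [if_pos (h.mpr hc), if_pos hc]
  · rw [if_neg (fun hh => hc (h.mp hh)), if_neg hc]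

lemma pv_zipAcc (g : Option Int → Int) (rows : List (List (Option Int))) (acc : List Int)
    (h : ∀ r ∈ rows, acc.length ≤ r.length) :
    rows.foldl (fun a r => List.zipWith (fun c x => c + g x) a r) acc
      = (List.range acc.length).map
          (fun j => (acc[j]?).getD 0 + (rows.map (fun r => g ((r[j]?).getD none))).sum) := by
  induction rows generalizing acc with
  | nil =>
    simp only [List.foldl_nil, List.map_nil, List.sum_nil, add_zero]
    apply List.ext_getElem
    · simp
    · intro i h1 h2
      simp [List.getElem?_eq_getElem h1]
  | cons r rows ih =>
    have hlen : (List.zipWith (fun c x => c + g x) acc r).length = acc.length := by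
      have := h r (List.mem_cons_self)
      simp [List.length_zipWith]; omega
    rw [List.foldl_cons, ih _ (by intro r' hr'; rw [hlen]; exact h r' (List.mem_cons_of_mem _ hr'))]
    rw [hlen]
    apply List.map_congr_left
    intro j hj
    have hjw : j < acc.length := List.mem_range.mp hj
    have hjr : j < r.length := lt_of_lt_of_le hjw (h r List.mem_cons_self)
    rw [List.getElem?_zipWith]
    simp [hjw, hjr]
    ring

lemma pv_repl0 (n j : Nat) : (((List.replicate n (0:Int))[j]?).getD 0) = 0 := by
  by_cases h : j < n <;> simp [h]

lemma pv_innerFold (row : List (Option Int)) :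
    row.foldl (fun (q : Int × Int) x =>
        if x = some 0 ∨ x = some 1 then (q.1 + 1, q.2)
        else if x = none then (q.1, q.2 + 1) else q) (0, 0)
      = ((row.countP (fun x => decide (x = some 0 ∨ x = some 1)) : Int), (row.count none : Int)) := by
  have hstep : (fun (q : Int × Int) (x : Option Int) =>
        if x = some 0 ∨ x = some 1 then (q.1 + 1, q.2)
        else if x = none then (q.1, q.2 + 1) else q)
      = fun q x => (q.1 + (if x = some 0 ∨ x = some 1 then 1 else 0),
                    q.2 + (if x = none then 1 else 0)) := by
    funext q x
    rcases x with _ | v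
    · simp
    · by_cases h : v = (0:Int) ∨ v = 1 <;> simp [h]
  rw [hstep, pv_pairFold, pv_count01, pv_countNone]
  simp

lemma pv_tripleFold {α γ₁ γ₂ γ₃ : Type} (f1 : γ₁ → α → γ₁) (f2 : γ₂ → α → γ₂) (f3 : γ₃ → α → γ₃)
    (l : List α) (a : γ₁) (b : γ₂) (c : γ₃) :
    l.foldl (fun s x => (f1 s.1 x, f2 s.2.1 x, f3 s.2.2 x)) (a, b, c)
      = (l.foldl f1 a, l.foldl f2 b, l.foldl f3 c) := by
  induction l generalizing a b c with
  | nil => simp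
  | cons x xs ih => simp [ih]

lemma pv_A_eval (stanje : List (List (Option Int))) (hne : stanje ≠ []) :
    odredi_heuristiku stanje = pvCanon stanje := by
  simp only [odredi_heuristiku]
  rw [pv_get0 _ _ hne]
  rw [pv_pairFold]
  simp only [PySem.List.pyGet?_natCast, pv_colmap, pv_indA]
  rw [pv_pairFold]
  unfold pvCanon pvCol pvHalf
  simp only [PySem.List.sum_map_add_int]
  ring

lemma pv_B_eval (stanje : List (List (Option Int))) (hne : stanje ≠ [])
    (hlen : ∀ r ∈ stanje, stanje.headI.length ≤ r.length) :
    odredi_heuristiku_alt stanje = pvCanon stanje := by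
  simp only [odredi_heuristiku_alt]
  rw [pv_get0 _ _ hne]
  simp only [pv_innerFold]
  rw [pv_tripleFold
        (f1 := fun t (row : List (Option Int)) =>
          t + (if (row.countP (fun x => decide (x = some 0 ∨ x = some 1)) : Int) = (row.length : Int) then 1 else 0)
            + (if (row.count none : Int) = 1 then 1 else 0))
        (f2 := fun cf row => List.zipWith (fun c x => c + (if x = some 0 ∨ x = some 1 then (1 : Int) else 0)) cf row)
        (f3 := fun cn row => List.zipWith (fun c x => c + (if x = none then (1 : Int) else 0)) cn row)]
  rw [pv_zipAcc _ _ _ (by simpa using hlen), pv_zipAcc _ _ _ (by simpa using hlen)]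
  simp only [List.length_replicate, pv_repl0, zero_add]
  rw [List.zip_map', List.foldl_map]
  rw [pv_sumFold]
  rw [pv_sumFold]
  have hcol : ∀ j : Nat,
      ((if (stanje.map (fun r => if ((r[j]?).getD none) = some 0 ∨ ((r[j]?).getD none) = some 1 then (1:Int) else 0)).sum = (stanje.length : Int) then (1:Int) else 0)
        + (if (stanje.map (fun r => if ((r[j]?).getD none) = none then (1:Int) else 0)).sum = 1 then (1:Int) else 0))
      = pvFull (pvCol stanje j) + pvHalf (pvCol stanje j) := by
    intro j
    have h1 := pv_count01 (stanje.map (fun r => (r[j]?).getD none))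
    have h2 := pv_countNone (stanje.map (fun r => (r[j]?).getD none))
    rw [List.map_map] at h1 h2
    simp only [Function.comp_def] at h1 h2
    unfold pvFull pvHalf pvCol
    rw [h1, h2]
    have hl : (stanje.map (fun r => (r[j]?).getD none)).length = stanje.length := by simp
    rw [hl]
    simp [Nat.cast_inj, Nat.cast_eq_one]
  have hrow : ∀ r : List (Option Int),
      ((if (r.countP (fun x => decide (x = some 0 ∨ x = some 1)) : Int) = (r.length : Int) then (1:Int) else 0)
        + (if (r.count none : Int) = 1 then (1:Int) else 0))
      = pvFull r + pvHalf r := by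
    intro r
    unfold pvFull pvHalf
    simp [Nat.cast_inj, Nat.cast_eq_one]
  simp only [hcol, hrow]
  unfold pvCanon
  ring

-- ===== VERDICT (by name: the statement is the Claim_ definition above) =====
theorem odredi_heuristiku_spec : Claim_equal_odredi_heuristiku := by
  intro stanje _ hpre
  unfold Spec_odredi_heuristiku
  rw [pv_A_eval stanje hpre.1, pv_B_eval stanje hpre.1 hpre.2]
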